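-- pv_equiv track=rewrite | github.com/grasshopperTrainer/coding_practice | baekjoon/accepted/LIS 가장 긴 증가하는 부분수열/2565 전깃줄.py | solution
-- ===== SOURCE A (Python) =====
-- def solution(N, wires):
--     def binary_search(arr, v):
--         l, r = 0, len(arr)
--         while l < r:
--             mid = (r+l)//2
--             if arr[mid] <= v:   # 같으면 안됨 같으면 한칸 위의 것을 확인해야 하기 때문에 <=
--                 l, r = mid+1, r
--             else:
--                 l, r = l, mid
--         return l
--
--     # find LIS
--     series = [0] + [b for _, b in sorted(wires, key=lambda x: x[0])]
--     LIS = [0]*(N+1)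
--     cache = [0]
--     for i in range(1, N+1):
--         pos = binary_search(cache, series[i])
--         LIS[i] = pos
--         if pos >= len(cache):
--             cache.append(series[i])
--         else:
--             cache[pos] = series[i]
--     return N-len(cache)-1
-- ===== SOURCE B (Python) =====
-- def solution(N, wires):
--     # O(N^2) DP for the longest non-decreasing subsequence of the sorted-b series
--     # (with the same leading sentinel 0), instead of A's patience/binary-search method.
--     series = [0] + [b for _, b in sorted(wires, key=lambda x: x[0])]
--     d = [1]  # d[j] = length of the longest non-decreasing subsequence ending at series[j]
--     for i in range(1, N + 1):
--         v = series[i]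
--         best = 0
--         for x, dx in zip(series, d):  # zip truncates to the processed prefix
--             if x <= v and dx > best:
--                 best = dx
--         d.append(best + 1)
--     return N - max(d) - 1
-- ===== Notes on version B (the rewrite author's own statement) =====
-- stated objective: alternative
-- what changed: Replaces A's patience method (a tails array maintained with a hand-written binary search) by a direct quadratic DP that computes, for each series element, the length of the longest non-decreasing subsequence ending there, and returns N - max(dp) - 1.
import Mathlib
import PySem

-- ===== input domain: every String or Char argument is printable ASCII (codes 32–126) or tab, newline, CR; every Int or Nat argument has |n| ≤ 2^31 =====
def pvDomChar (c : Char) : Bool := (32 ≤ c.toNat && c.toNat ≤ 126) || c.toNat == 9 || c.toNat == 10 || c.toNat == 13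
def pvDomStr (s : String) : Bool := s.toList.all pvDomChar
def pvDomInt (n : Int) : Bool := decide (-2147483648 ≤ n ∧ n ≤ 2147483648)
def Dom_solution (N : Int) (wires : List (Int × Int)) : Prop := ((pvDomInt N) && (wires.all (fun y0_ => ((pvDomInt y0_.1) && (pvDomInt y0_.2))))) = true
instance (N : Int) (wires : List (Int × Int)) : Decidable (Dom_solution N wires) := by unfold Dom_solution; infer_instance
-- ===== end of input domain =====

-- B computes the same answer by a quadratic longest-non-decreasing-subsequence DP instead of
-- A's patience method (tails array + hand-written binary search); equal return values, no speed claim.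

-- ===== PORT A =====
-- A's inner helper `binary_search` (the while-loop, step for step; indices are always in
-- range when called, so pyGetD's default is never used on admitted inputs)
def bsearchLoop (arr : List Int) (v l r : Int) : Int :=
  if _h : l < r then
    if PySem.List.pyGetD arr (PySem.Int.floordiv (r + l) 2) 0 ≤ v then
      bsearchLoop arr v (PySem.Int.floordiv (r + l) 2 + 1) r
    else
      bsearchLoop arr v l (PySem.Int.floordiv (r + l) 2)
  else l
termination_by (r - l).toNat
decreasing_by
  all_goals
    (have hm : PySem.Int.floordiv (r + l) 2 = (r + l) / 2 :=
      PySem.Int.floordiv_eq_ediv_of_pos (by omega)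
     omega)

def solution (N : Int) (wires : List (Int × Int)) : Int :=
  let series : List Int := 0 :: (PySem.List.sorted wires (fun x => x.1)).map (fun x => x.2)
  let LIS : List Int := List.replicate (N + 1).toNat 0
  let st :=
    (PySem.List.pyRange 1 (N + 1) 1).foldl
      (fun (st : List Int × List Int) i =>
        let v := PySem.List.pyGetD series i 0        -- series[i]; IndexError outside Pre_
        let pos := bsearchLoop st.2 v 0 (st.2.length : Int)
        let LIS' := PySem.List.pySetD st.1 i pos
        if pos ≥ (st.2.length : Int) then (LIS', st.2 ++ [v])
        else (LIS', PySem.List.pySetD st.2 pos v))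
      (LIS, ([0] : List Int))
  N - (st.2.length : Int) - 1

-- ===== PORT B =====
def solution_alt (N : Int) (wires : List (Int × Int)) : Int :=
  let series : List Int := 0 :: (PySem.List.sorted wires (fun x => x.1)).map (fun x => x.2)
  let d :=
    (PySem.List.pyRange 1 (N + 1) 1).foldl
      (fun (d : List Int) i =>
        let v := PySem.List.pyGetD series i 0        -- series[i]; IndexError outside Pre_
        let best := (series.zip d).foldl
          (fun best xd => if xd.1 ≤ v ∧ xd.2 > best then xd.2 else best) 0
        d ++ [best + 1])
      ([1] : List Int)
  N - (PySem.List.max? d (fun x => x)).getD 0 - 1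

-- ===== PRECONDITION & SPEC =====
-- Pre_ excludes exactly the inputs where A raises IndexError (series[i] with i > len(wires));
-- B raises the same IndexError there.
def Pre_solution (N : Int) (wires : List (Int × Int)) : Prop := N ≤ (wires.length : Int)
instance (N : Int) (wires : List (Int × Int)) : Decidable (Pre_solution N wires) := by
  unfold Pre_solution; infer_instance
def pvWitness_solution : Int × (List (Int × Int)) := (3, [(1, 8), (3, 9), (2, 2)])

def Spec_solution (N : Int) (wires : List (Int × Int)) (out : Int) : Prop := out = solution_alt N wires
instance (N : Int) (wires : List (Int × Int)) (out : Int) : Decidable (Spec_solution N wires out) := by unfold Spec_solution; infer_instance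

-- ===== CLAIM (what is proved, stated in full; the proofs are below) =====
def Claim_equal_solution : Prop := ∀ (N : Int) (wires : List (Int × Int)), Dom_solution N wires → Pre_solution N wires → Spec_solution N wires (solution N wires)

-- ===== LEMMAS AND PROOFS =====

-- A's cache update for one value, as a function of the cache alone
def stepA (cache : List Int) (v : Int) : List Int :=
  if bsearchLoop cache v 0 (cache.length : Int) ≥ (cache.length : Int) then cache ++ [v]
  else PySem.List.pySetD cache (bsearchLoop cache v 0 (cache.length : Int)) v

-- B's inner fold (max of the qualifying dp values)
def bestOf (z : List (Int × Int)) (v b0 : Int) : Int :=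
  z.foldl (fun best xd => if xd.1 ≤ v ∧ xd.2 > best then xd.2 else best) b0

-- B's dp update for one value
def stepB (series d : List Int) (v : Int) : List Int := d ++ [bestOf (series.zip d) v 0 + 1]

-- the invariant tying the patience cache to the dp table over the processed prefix p
def PatInv (p d cache : List Int) : Prop :=
  d.length = p.length ∧
  (∀ y ∈ d, 1 ≤ y ∧ y ≤ (cache.length : Int)) ∧
  ((cache.length : Int) ∈ d) ∧
  cache.Pairwise (· ≤ ·) ∧
  (∀ (k : Nat) (hk : k < cache.length), ∃ pr ∈ p.zip d, pr.2 = (k : Int) + 1 ∧ pr.1 = cache[k]) ∧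
  (∀ pr ∈ p.zip d, ∀ (k : Nat), pr.2 = (k : Int) + 1 →
      ∃ hk : k < cache.length, cache[k]'hk ≤ pr.1)

lemma bsearch_spec (arr : List Int) (v : Int) :
    ∀ (n : Nat) (l r : Int), (r - l).toNat = n → 0 ≤ l → l ≤ r → r ≤ (arr.length : Int) →
      l ≤ bsearchLoop arr v l r ∧ bsearchLoop arr v l r ≤ r ∧
      (bsearchLoop arr v l r = l ∨ PySem.List.pyGetD arr (bsearchLoop arr v l r - 1) 0 ≤ v) ∧
      (bsearchLoop arr v l r = r ∨ v < PySem.List.pyGetD arr (bsearchLoop arr v l r) 0) := by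
  intro n
  induction n using Nat.strong_induction_on with
  | _ n ih =>
    intro l r hn h0 hlr hrlen
    rw [bsearchLoop]
    split
    · rename_i hlt
      have hm : PySem.Int.floordiv (r + l) 2 = (r + l) / 2 :=
        PySem.Int.floordiv_eq_ediv_of_pos (by omega)
      set mid := PySem.Int.floordiv (r + l) 2 with hmid
      have hmb : l ≤ mid ∧ mid < r := by omega
      split
      · rename_i hle
        have hrec := ih (r - (mid + 1)).toNat (by omega) (mid + 1) r rfl (by omega)
          (by omega) hrlen
        refine ⟨by omega, hrec.2.1, ?_, hrec.2.2.2⟩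
        rcases hrec.2.2.1 with heq | hval
        · right
          have e : mid + 1 - 1 = mid := by omega
          rw [heq, e]
          exact hle
        · exact Or.inr hval
      · rename_i hgt
        have hrec := ih (mid - l).toNat (by omega) l mid rfl h0 (by omega) (by omega)
        refine ⟨hrec.1, by omega, hrec.2.2.1, ?_⟩
        rcases hrec.2.2.2 with heq | hval
        · right
          rw [heq]
          omega
        · exact Or.inr hval
    · exact ⟨le_refl l, hlr, Or.inl rfl, Or.inl (by omega)⟩

lemma bestOf_init_le (z : List (Int × Int)) (v b0 : Int) : b0 ≤ bestOf z v b0 := by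
  induction z generalizing b0 with
  | nil => simp [bestOf]
  | cons x t ih =>
    simp only [bestOf, List.foldl_cons]
    split
    · exact le_trans (by omega) (ih _)
    · exact ih b0

lemma bestOf_ge (z : List (Int × Int)) (v b0 : Int) :
    ∀ pr ∈ z, pr.1 ≤ v → pr.2 ≤ bestOf z v b0 := by
  induction z generalizing b0 with
  | nil => simp
  | cons x t ih =>
    intro pr hpr hle
    simp only [List.mem_cons] at hpr
    rcases hpr with rfl | hpr
    · simp only [bestOf, List.foldl_cons]
      split
      · exact bestOf_init_le t v _
      · rename_i h
        have : pr.2 ≤ b0 := by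
          by_contra hc
          exact h ⟨hle, by omega⟩
        exact le_trans this (bestOf_init_le t v _)
    · exact ih _ pr hpr hle

lemma bestOf_cases (z : List (Int × Int)) (v b0 : Int) :
    bestOf z v b0 = b0 ∨ ∃ pr ∈ z, pr.1 ≤ v ∧ bestOf z v b0 = pr.2 := by
  induction z generalizing b0 with
  | nil => simp [bestOf]
  | cons x t ih =>
    simp only [bestOf, List.foldl_cons]
    split
    · rename_i h
      rcases ih x.2 with h1 | ⟨pr, hm, hle, heq⟩
      · exact Or.inr ⟨x, List.mem_cons_self, h.1, h1⟩
      · exact Or.inr ⟨pr, List.mem_cons_of_mem _ hm, hle, heq⟩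
    · rcases ih b0 with h1 | ⟨pr, hm, hle, heq⟩
      · exact Or.inl h1
      · exact Or.inr ⟨pr, List.mem_cons_of_mem _ hm, hle, heq⟩

lemma zip_trunc {α β : Type} (p rest : List α) (d : List β) (h : d.length ≤ p.length) :
    (p ++ rest).zip d = p.zip d := by
  induction p generalizing d with
  | nil =>
    have : d = [] := List.eq_nil_of_length_eq_zero (Nat.le_zero.mp (by simpa using h))
    simp [this]
  | cons x t ih =>
    cases d with
    | nil => simp
    | cons y s =>
      simp only [List.cons_append, List.zip_cons_cons]
      rw [ih s (by simpa using h)]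

lemma PatInv_step (series p d cache : List Int) (v : Int)
    (hpre : p <+: series) (hinv : PatInv p d cache) :
    PatInv (p ++ [v]) (stepB series d v) (stepA cache v) := by
  obtain ⟨h1, h2, h3, h4, h5, h6⟩ := hinv
  obtain ⟨q, hq⟩ := hpre
  have hzip : series.zip d = p.zip d := by
    rw [← hq]
    exact zip_trunc p q d (le_of_eq h1)
  simp only [stepB, stepA]
  rw [hzip]
  set len := cache.length with hlen
  set pos := bsearchLoop cache v 0 (len : Int) with hposdef
  set best := bestOf (p.zip d) v 0 with hbestdef
  have hspec := bsearch_spec cache v ((len : Int) - 0).toNat 0 (len : Int) rfl le_rfl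
    (by omega) le_rfl
  obtain ⟨hp0, hplen, hlo0, hhi0⟩ := hspec
  rw [← hposdef] at hp0 hplen hlo0 hhi0
  have hsort : ∀ (a b : Nat) (ha : a < len) (hb : b < len), a ≤ b → cache[a] ≤ cache[b] := by
    intro a b ha hb hab
    rcases Nat.lt_or_eq_of_le hab with h | h
    · exact List.pairwise_iff_getElem.mp h4 a b ha hb h
    · subst h
      exact le_refl _
  have hlo : ∀ (k : Nat) (hk : k < len), (k : Int) < pos → cache[k] ≤ v := by
    intro k hk hkpos
    rcases hlo0 with h | h
    · omega
    · rw [PySem.List.pyGetD_eq_getElem cache 0 (by omega) (by omega)] at h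
      exact le_trans (hsort k (pos - 1).toNat hk (by omega) (by omega)) h
  have hhi : ∀ (k : Nat) (hk : k < len), pos ≤ (k : Int) → v < cache[k] := by
    intro k hk hkpos
    rcases hhi0 with h | h
    · omega
    · rw [PySem.List.pyGetD_eq_getElem cache 0 hp0 (by omega)] at h
      exact lt_of_lt_of_le h (hsort pos.toNat k (by omega) hk (by omega))
  have hbp : best = pos := by
    have hle : best ≤ pos := by
      rcases bestOf_cases (p.zip d) v 0 with h | ⟨pr, hm, hprv, heq⟩
      · omega
      · have hd2 : pr.2 ∈ d := (List.of_mem_zip hm).2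
        have h12 := h2 pr.2 hd2
        have hk1 : pr.2 = ((pr.2 - 1).toNat : Int) + 1 := by omega
        obtain ⟨hklen, hck⟩ := h6 pr hm (pr.2 - 1).toNat hk1
        by_contra hcon
        rw [not_le] at hcon
        have hge' : pos ≤ ((pr.2 - 1).toNat : Int) := by omega
        have := hhi (pr.2 - 1).toNat hklen hge'
        omega
    have hge : pos ≤ best := by
      by_cases h0 : pos = 0
      · rw [h0]
        exact bestOf_init_le _ _ _
      · have hklen : (pos - 1).toNat < len := by omega
        obtain ⟨pr, hm, hpr2, hpr1⟩ := h5 (pos - 1).toNat hklen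
        have hc : cache[(pos - 1).toNat] ≤ v := hlo (pos - 1).toNat hklen (by omega)
        have := bestOf_ge (p.zip d) v 0 pr hm (by rw [hpr1]; exact hc)
        omega
    omega
  have hzap : (p ++ [v]).zip (d ++ [best + 1]) = p.zip d ++ [(v, best + 1)] := by
    rw [List.zip_append h1.symm]
    simp
  split
  · rename_i hge
    have hpl : pos = (len : Int) := by omega
    have hbl : best = (len : Int) := by omega
    have hlen' : ((cache ++ [v]).length : Int) = (len : Int) + 1 := by simp; omega
    refine ⟨by simp [h1], ?_, ?_, ?_, ?_, ?_⟩
    · intro y hy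
      rcases List.mem_append.mp hy with hy | hy
      · have := h2 y hy
        rw [hlen']
        omega
      · simp only [List.mem_singleton] at hy
        subst hy
        rw [hlen']
        omega
    · rw [hlen']
      exact List.mem_append_right _ (by simp only [List.mem_singleton]; omega)
    · rw [List.pairwise_append]
      refine ⟨h4, by simp, ?_⟩
      intro x hx y hy
      simp only [List.mem_singleton] at hy
      subst hy
      obtain ⟨k, hk, rfl⟩ := List.mem_iff_getElem.mp hx
      exact hlo k hk (by omega)
    · intro k hk
      rw [hzap]
      simp only [List.length_append, List.length_singleton] at hk
      by_cases hkl : k < len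
      · obtain ⟨pr, hm, e2, e1⟩ := h5 k hkl
        refine ⟨pr, List.mem_append_left _ hm, e2, ?_⟩
        rw [e1]
        exact (List.getElem_append_left hkl).symm
      · have hke : k = len := by omega
        subst hke
        refine ⟨(v, best + 1), List.mem_append_right _ (by simp), by simp; omega, ?_⟩
        exact (List.getElem_concat_length hlen _).symm
    · intro pr hm k hk2
      rw [hzap] at hm
      rcases List.mem_append.mp hm with hm | hm
      · obtain ⟨hklen, hck⟩ := h6 pr hm k hk2
        refine ⟨by simp; omega, ?_⟩
        rw [List.getElem_append_left hklen]
        exact hck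
      · simp only [List.mem_singleton] at hm
        subst hm
        simp only at hk2
        have hke : k = len := by omega
        subst hke
        refine ⟨by simp; omega, ?_⟩
        rw [List.getElem_concat_length hlen]
  · rename_i hltc
    have hplt : pos < (len : Int) := by omega
    rw [PySem.List.pySetD_of_nonneg cache v hp0]
    have hpnl : pos.toNat < len := by omega
    have hlen' : ((cache.set pos.toNat v).length : Int) = (len : Int) := by simp; omega
    refine ⟨by simp [h1], ?_, ?_, ?_, ?_, ?_⟩
    · intro y hy
      rcases List.mem_append.mp hy with hy | hy
      · have := h2 y hy
        rw [hlen']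
        omega
      · simp only [List.mem_singleton] at hy
        subst hy
        rw [hlen']
        omega
    · rw [hlen']
      exact List.mem_append_left _ h3
    · rw [List.pairwise_iff_getElem]
      intro i j hi hj hij
      simp only [List.length_set] at hi hj
      rw [List.getElem_set, List.getElem_set]
      split_ifs with e1 e2
      · omega
      · have : pos ≤ (j : Int) := by omega
        exact le_of_lt (hhi j hj this)
      · rename_i e3
        have : (i : Int) < pos := by omega
        exact hlo i hi this
      · exact hsort i j hi hj (by omega)
    · intro k hk
      rw [hzap]
      simp only [List.length_set] at hk
      by_cases hke : k = pos.toNat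
      · subst hke
        refine ⟨(v, best + 1), List.mem_append_right _ (by simp), by simp; omega, ?_⟩
        rw [List.getElem_set, if_pos rfl]
      · obtain ⟨pr, hm, e2, e1⟩ := h5 k hk
        refine ⟨pr, List.mem_append_left _ hm, e2, ?_⟩
        rw [e1, List.getElem_set, if_neg (fun h => hke h.symm)]
    · intro pr hm k hk2
      rw [hzap] at hm
      rcases List.mem_append.mp hm with hm | hm
      · obtain ⟨hklen, hck⟩ := h6 pr hm k hk2
        refine ⟨by simp; omega, ?_⟩
        rw [List.getElem_set]
        by_cases hke : pos.toNat = k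
        · subst hke
          rw [if_pos rfl]
          have := hhi pos.toNat hpnl (by omega)
          omega
        · rw [if_neg hke]
          exact hck
      · simp only [List.mem_singleton] at hm
        subst hm
        simp only at hk2
        have hke : k = pos.toNat := by omega
        subst hke
        refine ⟨by simp; omega, ?_⟩
        rw [List.getElem_set, if_pos rfl]

lemma PatInv_run (series : List Int) :
    ∀ (rest p d cache : List Int), (p ++ rest) <+: series → PatInv p d cache →
      PatInv (p ++ rest) (rest.foldl (stepB series) d) (rest.foldl stepA cache) := by
  intro rest
  induction rest with
  | nil =>
    intro p d cache hpre hinv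
    simpa using hinv
  | cons v t ih =>
    intro p d cache hpre hinv
    have hp : p <+: series := (List.prefix_append p (v :: t)).trans hpre
    have hstep := PatInv_step series p d cache v hp hinv
    have he : p ++ v :: t = (p ++ [v]) ++ t := by simp
    rw [he] at hpre ⊢
    simpa using ih (p ++ [v]) (stepB series d v) (stepA cache v) hpre hstep

lemma PatInv_init : PatInv [0] [1] [0] := by
  refine ⟨rfl, ?_, by simp, by simp, ?_, ?_⟩
  · intro y hy
    simp only [List.mem_singleton] at hy
    subst hy
    simp
  · intro k hk
    simp only [List.length_singleton] at hk
    interval_cases k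
    exact ⟨(0, 1), by simp [List.zip]⟩
  · intro pr hpr k hk
    simp only [List.zip, List.zipWith, List.mem_singleton] at hpr
    subst hpr
    simp only at hk
    have : k = 0 := by omega
    subst this
    exact ⟨by simp, by simp⟩

lemma foldl_pair_snd {σ τ ι : Type} (l : List ι) (F : (σ × τ) → ι → (σ × τ))
    (g : τ → ι → τ) (p : σ × τ) (hF : ∀ st i, (F st i).2 = g st.2 i) :
    (l.foldl F p).2 = l.foldl g p.2 := by
  induction l generalizing p with
  | nil => rfl
  | cons x t ih =>
    simp only [List.foldl_cons]
    rw [ih, hF]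

lemma solution_eq (N : Int) (wires : List (Int × Int)) :
    solution N wires = N - (((PySem.List.pyRange 1 (N + 1) 1).foldl
      (fun c i => stepA c (PySem.List.pyGetD
        (0 :: (PySem.List.sorted wires (fun x => x.1)).map (fun x => x.2)) i 0))
      [0]).length : Int) - 1 := by
  simp only [solution]
  rw [foldl_pair_snd _ _
      (fun c i => stepA c (PySem.List.pyGetD
        (0 :: (PySem.List.sorted wires (fun x => x.1)).map (fun x => x.2)) i 0)) _
      (by
        intro st i
        dsimp only
        simp only [stepA]
        split <;> rfl)]

lemma solution_alt_eq (N : Int) (wires : List (Int × Int)) :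
    solution_alt N wires = N - (PySem.List.max? ((PySem.List.pyRange 1 (N + 1) 1).foldl
      (fun d i => stepB (0 :: (PySem.List.sorted wires (fun x => x.1)).map (fun x => x.2)) d
        (PySem.List.pyGetD
          (0 :: (PySem.List.sorted wires (fun x => x.1)).map (fun x => x.2)) i 0))
      [1]) (fun x => x)).getD 0 - 1 := by
  simp only [solution_alt, stepB, bestOf]

-- ===== VERDICT (by name: the statement is the Claim_ definition above) =====
theorem solution_spec : Claim_equal_solution := by
  unfold Claim_equal_solution
  intro N wires _hdom hpre
  unfold Pre_solution at hpre
  unfold Spec_solution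
  rw [solution_eq, solution_alt_eq]
  set series : List Int :=
    0 :: (PySem.List.sorted wires (fun x => x.1)).map (fun x => x.2) with hser
  by_cases hN : N + 1 ≤ 1
  · rw [PySem.List.pyRange_one_eq_nil hN]
    simp only [List.foldl_nil]
    norm_num [PySem.List.max?]
  · have hserlen : series.length = wires.length + 1 := by
      simp [hser, PySem.List.length_sorted]
    set M := (N + 1).toNat with hMdef
    have hM1 : (M : Int) = N + 1 := by omega
    have hMle : M ≤ series.length := by omega
    set xs := series.take M with hxs
    have hxslen : xs.length = M := by
      rw [hxs, List.length_take]
      omega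
    have hcong : ∀ (i : Int), i ∈ PySem.List.pyRange 1 (N + 1) 1 →
        PySem.List.pyGetD series i 0 = PySem.List.pyGetD xs i 0 := by
      intro i hi
      rw [PySem.List.mem_pyRange_one] at hi
      have h0 : 0 ≤ i := by omega
      have h1 : i < (xs.length : Int) := by omega
      have h2 : i < (series.length : Int) := by omega
      rw [PySem.List.pyGetD_eq_getElem series 0 h0 h2,
        PySem.List.pyGetD_eq_getElem xs 0 h0 h1]
      simp [hxs, List.getElem_take]
    rw [PySem.List.foldl_congr_mem _
      (fun c i => stepA c (PySem.List.pyGetD series i 0))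
      (fun c i => stepA c (PySem.List.pyGetD xs i 0)) _
      (fun c i hi => by simp only [hcong i hi])]
    rw [PySem.List.foldl_congr_mem _
      (fun d i => stepB series d (PySem.List.pyGetD series i 0))
      (fun d i => stepB series d (PySem.List.pyGetD xs i 0)) _
      (fun c i hi => by simp only [hcong i hi])]
    have hrange : PySem.List.pyRange 1 (N + 1) 1 = PySem.List.pyRange 1 (xs.length : Int) 1 := by
      rw [show ((xs.length : Int)) = N + 1 by omega]
    rw [hrange, PySem.List.foldl_pyRange_pyGetD' xs 0 stepA [0] (by omega),
      PySem.List.foldl_pyRange_pyGetD' xs 0 (stepB series) [1] (by omega)]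
    have hxcons : xs = 0 :: xs.drop 1 := by
      obtain ⟨m, hm⟩ : ∃ m, M = m + 1 := ⟨M - 1, by omega⟩
      rw [hxs, hser, hm, List.take_succ_cons]
      simp
    have hxpre : ([0] ++ xs.drop 1) <+: series := by
      rw [show ([(0 : Int)] ++ xs.drop 1) = xs from by rw [hxcons]; simp]
      rw [hxs]
      exact List.take_prefix M series
    have hrun := PatInv_run series (xs.drop 1) [0] [1] [0] hxpre PatInv_init
    obtain ⟨g1, g2, g3, g4, g5, g6⟩ := hrun
    have hone : (1 : Int).toNat = 1 := rfl
    rw [hone]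
    set dF := (xs.drop 1).foldl (stepB series) [1] with hdF
    set cF := (xs.drop 1).foldl stepA [0] with hcF
    obtain ⟨m, hm⟩ : ∃ m, PySem.List.max? dF (fun x => x) = some m := by
      cases h : PySem.List.max? dF (fun x => x) with
      | none =>
        rw [PySem.List.max?_eq_none_iff] at h
        exact absurd (h ▸ g3) (List.not_mem_nil)
      | some m => exact ⟨m, rfl⟩
    have hmm : m ∈ dF := PySem.List.max?_mem hm
    have hup : m ≤ (cF.length : Int) := (g2 m hmm).2
    have hlow : (cF.length : Int) ≤ m := PySem.List.max?_isMax hm _ g3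
    rw [hm]
    simp only [Option.getD_some]
    omega
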